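-- pv_equiv track=rewrite | github.com/irista24/PortlandStateUniversitySyllabusSummarizer | whhyy.py | match_sentences_with_keywords
-- ===== SOURCE A (Python) =====
-- def match_sentences_with_keywords(sentences, keywords):
--     matched_sentences = []
--     for sentence in sentences:
--         for keyword in keywords:
--             if keyword.lower() in sentence.lower():
--                 matched_sentences.append((keyword, sentence))
--                 break
--     return matched_sentences
-- ===== SOURCE B (Python) =====
-- def match_sentences_with_keywords(sentences, keywords):
--     # Keyword-major staged sweep: for each keyword, from the LAST to the FIRST,
--     # overwrite the best-match slot of every sentence that contains it; after all
--     # sweeps each slot holds the first (in keywords order) containing keyword.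
--     lows = [s.lower() for s in sentences]
--     best = [None] * len(sentences)
--     for kw in reversed(keywords):
--         kl = kw.lower()
--         best = [kw if kl in low else b for b, low in zip(best, lows)]
--     return [(b, s) for b, s in zip(best, sentences) if b is not None]
-- ===== Notes on version B (the rewrite author's own statement) =====
-- stated objective: alternative
-- what changed: B inverts the loop nesting: instead of scanning keywords per sentence with a break, it sweeps the keywords in reverse order over a per-sentence best-match vector, overwriting slots so the earliest keyword wins, and emits the pairs in one final zip pass.
import Mathlib
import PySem

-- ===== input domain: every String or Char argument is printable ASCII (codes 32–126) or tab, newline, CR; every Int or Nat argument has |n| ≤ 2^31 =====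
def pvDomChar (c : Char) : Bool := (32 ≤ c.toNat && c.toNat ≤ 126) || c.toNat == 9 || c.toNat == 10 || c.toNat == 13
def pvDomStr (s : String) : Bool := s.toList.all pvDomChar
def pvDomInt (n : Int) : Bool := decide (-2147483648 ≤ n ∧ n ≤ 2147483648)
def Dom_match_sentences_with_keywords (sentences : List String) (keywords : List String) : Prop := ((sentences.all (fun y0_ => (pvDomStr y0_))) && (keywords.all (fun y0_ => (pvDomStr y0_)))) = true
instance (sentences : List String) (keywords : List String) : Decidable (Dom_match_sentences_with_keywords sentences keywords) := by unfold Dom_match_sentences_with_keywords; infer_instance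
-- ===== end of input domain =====

-- B inverts the loop nesting: a reverse keyword-major sweep over a per-sentence
-- best-match vector (overwrite makes the earliest keyword win), then one zip pass.

-- ===== PORT A =====
-- inner 'for keyword in keywords: … break' loop of A, threading the accumulator
def pvInnerA (sentence : String) : List String → List (String × String) → List (String × String)
  | [], acc => acc
  | keyword :: rest, acc =>
      if PySem.Str.isIn (PySem.Str.lower keyword) (PySem.Str.lower sentence) then
        acc ++ [(keyword, sentence)]          -- append then break
      else
        pvInnerA sentence rest acc

def match_sentences_with_keywords (sentences : List String) (keywords : List String) : List (String × String) :=
  sentences.foldl (fun acc sentence => pvInnerA sentence keywords acc) []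

-- ===== PORT B =====
def match_sentences_with_keywords_alt (sentences : List String) (keywords : List String) : List (String × String) :=
  let lows := sentences.map PySem.Str.lower
  let best : List (Option String) :=
    keywords.reverse.foldl
      (fun best kw =>
        let kl := PySem.Str.lower kw
        List.zipWith (fun b low => if PySem.Str.isIn kl low then some kw else b) best lows)
      (List.replicate sentences.length none)
  (best.zip sentences).filterMap (fun p => p.1.map (fun k => (k, p.2)))

-- ===== PRECONDITION & SPEC =====
def Spec_match_sentences_with_keywords (sentences : List String) (keywords : List String) (out : List (String × String)) : Prop := out = match_sentences_with_keywords_alt sentences keywords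
instance (sentences : List String) (keywords : List String) (out : List (String × String)) : Decidable (Spec_match_sentences_with_keywords sentences keywords out) := by unfold Spec_match_sentences_with_keywords; infer_instance

-- ===== CLAIM (what is proved, stated in full; the proofs are below) =====
def Claim_equal_match_sentences_with_keywords : Prop := ∀ (sentences : List String) (keywords : List String), Dom_match_sentences_with_keywords sentences keywords → Spec_match_sentences_with_keywords sentences keywords (match_sentences_with_keywords sentences keywords)

-- ===== LEMMAS AND PROOFS =====
-- first keyword (in list order) whose lowercase occurs in low
def pvFirst (low : String) : List String → Option String
  | [] => none
  | k :: rest => if PySem.Str.isIn (PySem.Str.lower k) low then some k else pvFirst low rest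

-- A's inner loop equals acc ++ the first-match option for this sentence
theorem pvInnerA_eq (sentence : String) (ks : List String) (acc : List (String × String)) :
    pvInnerA sentence ks acc =
      acc ++ ((pvFirst (PySem.Str.lower sentence) ks).map (fun k => (k, sentence))).toList := by
  induction ks generalizing acc with
  | nil => simp [pvInnerA, pvFirst]
  | cons k rest ih =>
      simp only [pvInnerA, pvFirst]
      split_ifs with h
      · simp
      · simp [ih]

-- A's outer foldl equals acc ++ a filterMap of the first-match option
theorem pvOuterA_eq (keywords : List String) (sentences : List String) (acc : List (String × String)) :
    sentences.foldl (fun acc sentence => pvInnerA sentence keywords acc) acc =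
      acc ++ sentences.filterMap (fun s =>
        (pvFirst (PySem.Str.lower s) keywords).map (fun k => (k, s))) := by
  induction sentences generalizing acc with
  | nil => simp
  | cons s rest ih =>
      simp only [List.foldl_cons, List.filterMap_cons]
      rw [ih, pvInnerA_eq]
      cases (pvFirst (PySem.Str.lower s) keywords).map (fun k => (k, s)) with
      | none => simp
      | some p => simp

theorem pvZipMap_self {α β : Type} (g : α → β) (l : List α) :
    (l.map g).zip l = l.map (fun x => (g x, x)) := by
  induction l with
  | nil => rfl
  | cons x xs ih => simp [ih]

theorem pvZipWith_map_self {α β : Type} (f : β → α → β) (g : α → β) (l : List α) :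
    List.zipWith f (l.map g) l = l.map (fun x => f (g x) x) := by
  induction l with
  | nil => rfl
  | cons x xs ih => simp [ih]

-- B's reversed fold computes the pointwise first match over the lowered sentences
theorem pvBest_eq (ks : List String) (lows : List String) :
    ks.reverse.foldl
      (fun best kw =>
        List.zipWith (fun b low => if PySem.Str.isIn (PySem.Str.lower kw) low then some kw else b) best lows)
      (List.replicate lows.length none) =
    lows.map (fun low => pvFirst low ks) := by
  rw [List.foldl_reverse]
  induction ks with
  | nil =>
      simp [pvFirst, List.map_const']
  | cons k rest ih =>
      simp only [List.foldr_cons]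
      rw [ih, pvZipWith_map_self]
      apply List.map_congr_left
      intro low _
      by_cases h : PySem.Str.isIn (PySem.Str.lower k) low <;> simp only [pvFirst, h, if_true, Bool.false_eq_true, if_false]

-- ===== VERDICT (by name: the statement is the Claim_ definition above) =====
theorem match_sentences_with_keywords_spec : Claim_equal_match_sentences_with_keywords := by
  intro sentences keywords _
  unfold Spec_match_sentences_with_keywords match_sentences_with_keywords match_sentences_with_keywords_alt
  have hlen : sentences.length = (sentences.map PySem.Str.lower).length := by simp
  simp only []
  rw [pvOuterA_eq, hlen, pvBest_eq, List.map_map, pvZipMap_self, List.filterMap_map]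
  simp
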